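-- pv_equiv track=rewrite | github.com/NievasGustavo/TP-Grupal-AED-2024 | tp2/runnerProfes/trabajos/2024_TP2_G329_Liqui_98049[1K9]_Saura_400469[1k9]_Nievas_98683[1k9].py | check_cars
-- ===== SOURCE A (Python) =====
-- def check_cars(linea, car1, car2):
--     bandera_car1 = False
--     for car in linea:
--         if bandera_car1 and car in car2:
--             return True
--         bandera_car1 = False
--         if car in car1:
--             bandera_car1 = True
--     return False
-- ===== SOURCE B (Python) =====
-- def check_cars(linea, car1, car2):
--     # For each candidate pair (x, y), look for the two-character substring x+y in linea.
--     return any(x + y in linea for x in car1 for y in car2)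
-- ===== Notes on version B (the rewrite author's own statement) =====
-- stated objective: alternative
-- what changed: B searches linea for the two-character substring x+y for each (x,y) in the product car1 x car2, instead of A's single left-to-right scan threading a 'previous char was in car1' flag.
import Mathlib
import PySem

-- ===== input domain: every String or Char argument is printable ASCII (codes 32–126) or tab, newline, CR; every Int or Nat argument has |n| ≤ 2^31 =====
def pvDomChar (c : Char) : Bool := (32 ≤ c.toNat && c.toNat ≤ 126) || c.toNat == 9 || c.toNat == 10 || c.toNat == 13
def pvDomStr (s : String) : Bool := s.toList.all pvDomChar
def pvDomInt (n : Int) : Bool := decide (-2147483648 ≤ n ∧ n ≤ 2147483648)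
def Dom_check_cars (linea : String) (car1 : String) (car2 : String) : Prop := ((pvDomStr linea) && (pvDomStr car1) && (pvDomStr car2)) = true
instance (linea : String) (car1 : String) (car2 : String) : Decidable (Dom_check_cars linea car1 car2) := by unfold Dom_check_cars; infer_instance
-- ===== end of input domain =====

-- B replaces A's flag-threading scan by a substring search for x+y over the product car1 × car2 (alternative algorithm; same result).

-- ===== PORT A =====
-- A's for-loop with the carried flag `bandera_car1` and early return; `car in carX` is
-- char-in-string membership (exact: one-character membership = list membership).
def checkCarsLoop (car1 : String) (car2 : String) : List Char → Bool → Bool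
  | [], _ => false
  | car :: rest, bandera_car1 =>
    if bandera_car1 && car2.toList.contains car then true
    else checkCarsLoop car1 car2 rest (car1.toList.contains car)

def check_cars (linea : String) (car1 : String) (car2 : String) : Bool :=
  checkCarsLoop car1 car2 linea.toList false

-- ===== PORT B =====
-- any(x + y in linea for x in car1 for y in car2); 'sub in s' is PySem.Str.isIn (exact).
def check_cars_alt (linea : String) (car1 : String) (car2 : String) : Bool :=
  car1.toList.any (fun x =>
    car2.toList.any (fun y => PySem.Str.isIn (String.ofList [x, y]) linea))

-- ===== PRECONDITION & SPEC =====
def Spec_check_cars (linea : String) (car1 : String) (car2 : String) (out : Bool) : Prop := out = check_cars_alt linea car1 car2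
instance (linea : String) (car1 : String) (car2 : String) (out : Bool) : Decidable (Spec_check_cars linea car1 car2 out) := by unfold Spec_check_cars; infer_instance

-- ===== CLAIM (what is proved, stated in full; the proofs are below) =====
def Claim_equal_check_cars : Prop := ∀ (linea : String) (car1 : String) (car2 : String), Dom_check_cars linea car1 car2 → Spec_check_cars linea car1 car2 (check_cars linea car1 car2)

-- ===== LEMMAS AND PROOFS =====

-- A's loop characterised: from state `flag`, it returns true iff the flag fires on the
-- head, or some adjacent pair (a, b) of the list has a ∈ car1 and b ∈ car2.
lemma checkCarsLoop_eq (car1 car2 : String) :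
    ∀ (l : List Char) (flag : Bool),
      checkCarsLoop car1 car2 l flag =
        ((match l with
          | [] => false
          | c :: _ => flag && car2.toList.contains c) ||
         (l.zip l.tail).any (fun ab => car1.toList.contains ab.1 && car2.toList.contains ab.2)) := by
  intro l
  induction l with
  | nil => intro flag; simp [checkCarsLoop]
  | cons c rest ih =>
    intro flag
    rw [checkCarsLoop]
    cases rest with
    | nil => simp [checkCarsLoop]
    | cons d rest' =>
      rw [ih]
      simp only [List.tail_cons, List.zip_cons_cons, List.any_cons]
      cases flag <;> simp

-- A two-character list is an infix of l iff the pair occurs among l's adjacent pairs.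
lemma infix_pair_iff (x y : Char) :
    ∀ (l : List Char), ([x, y] <:+: l) ↔ (x, y) ∈ l.zip l.tail := by
  intro l
  induction l with
  | nil => simp
  | cons c rest ih =>
    cases rest with
    | nil =>
      constructor
      · intro h
        have := h.length_le
        simp at this
      · intro h; simp at h
    | cons d rest' =>
      rw [List.infix_cons_iff]
      constructor
      · rintro (h | h)
        · rcases h with ⟨t, ht⟩
          simp at ht
          obtain ⟨hx, hy, -⟩ := ht
          simp [hx, hy]
        · have := (ih).mp h
          simp only [List.tail_cons] at this ⊢
          simp [List.zip_cons_cons]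
          tauto
      · intro h
        simp only [List.tail_cons, List.zip_cons_cons, List.mem_cons] at h
        rcases h with h | h
        · left
          simp only [Prod.mk.injEq] at h
          obtain ⟨hx, hy⟩ := h
          exact ⟨rest', by simp [hx, hy]⟩
        · right
          exact ih.mpr (by simpa [List.zip_cons_cons] using h)

-- ===== VERDICT (by name: the statement is the Claim_ definition above) =====
theorem check_cars_spec : Claim_equal_check_cars := by
  intro linea car1 car2 _
  unfold Spec_check_cars check_cars check_cars_alt
  rw [checkCarsLoop_eq]
  rw [Bool.eq_iff_iff]
  rcases hl : linea.toList with _ | ⟨c, rest⟩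
  · simp only [List.tail_nil, List.zip_nil_right, List.any_nil, Bool.or_false,
      Bool.false_eq_true, false_iff, List.any_eq_true, not_exists, not_and]
    rintro x - y - h
    rw [PySem.Str.isIn_iff_infix] at h
    have := h.length_le; simp [hl] at this
  · simp only [Bool.false_and, Bool.or_eq_true, Bool.false_eq_true, false_or,
      List.any_eq_true]
    constructor
    · rintro ⟨⟨a, b⟩, hmem, hab⟩
      simp only [Bool.and_eq_true, List.contains_eq_mem, decide_eq_true_eq] at hab
      refine ⟨a, by simpa using hab.1, b, by simpa using hab.2, ?_⟩
      rw [PySem.Str.isIn_iff_infix]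
      simpa using (infix_pair_iff a b linea.toList).mpr (by rw [hl]; exact hmem)
    · rintro ⟨a, ha, b, hb, h⟩
      rw [PySem.Str.isIn_iff_infix] at h
      have hm := (infix_pair_iff a b linea.toList).mp (by simpa using h)
      rw [hl] at hm
      exact ⟨(a, b), hm, by simp [ha, hb]⟩
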